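-- pv_equiv track=rewrite | github.com/zentrum-lexikographie/dwdsmor | dwdsmor/cli/analyse.py | get_minimal_analyses
-- ===== SOURCE A (Python) =====
-- def count_boundaries(seg, boundaries):
--     count = sum([seg.count(boundary) for boundary in boundaries])
--     return count
--
-- def get_minimal_analyses(analyses, key, boundaries):
--     minimal_analyses = []
--     minimum = min(
--         [count_boundaries(analysis[key], boundaries) for analysis in analyses],
--         default=-1,
--     )
--     for analysis in analyses:
--         if count_boundaries(analysis[key], boundaries) == minimum:
--             minimal_analyses.append(analysis)
--     return minimal_analyses
-- ===== SOURCE B (Python) =====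
-- def get_minimal_analyses(analyses, key, boundaries):
--     # Single pass: track the current minimum and the analyses achieving it,
--     # resetting the collection whenever a strictly smaller count appears.
--     best = None
--     result = []
--     for analysis in analyses:
--         c = sum(analysis[key].count(boundary) for boundary in boundaries)
--         if best is None or c < best:
--             best = c
--             result = [analysis]
--         elif c == best:
--             result.append(analysis)
--     return result
-- ===== Notes on version B (the rewrite author's own statement) =====
-- stated objective: alternative
-- what changed: B makes a single pass keeping the running minimum and the list of analyses achieving it (resetting on a strictly smaller count), instead of A's separate min pass plus a second pass that recomputes every boundary count.
import Mathlib
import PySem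

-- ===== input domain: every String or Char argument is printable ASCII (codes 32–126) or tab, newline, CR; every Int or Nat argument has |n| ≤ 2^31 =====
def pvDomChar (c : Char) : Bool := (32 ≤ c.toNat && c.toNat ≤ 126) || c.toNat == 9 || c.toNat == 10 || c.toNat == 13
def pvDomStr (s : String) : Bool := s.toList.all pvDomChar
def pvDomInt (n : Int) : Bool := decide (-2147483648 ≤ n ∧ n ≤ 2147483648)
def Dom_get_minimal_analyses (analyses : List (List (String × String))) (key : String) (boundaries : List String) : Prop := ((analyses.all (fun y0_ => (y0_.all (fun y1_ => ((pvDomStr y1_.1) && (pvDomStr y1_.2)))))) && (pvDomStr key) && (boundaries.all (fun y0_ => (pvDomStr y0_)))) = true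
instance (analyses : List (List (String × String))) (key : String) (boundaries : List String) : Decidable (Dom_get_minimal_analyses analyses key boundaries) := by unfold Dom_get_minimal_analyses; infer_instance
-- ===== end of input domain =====

-- B replaces A's min-pass plus recount-pass by one pass carrying the running minimum
-- and the analyses achieving it, so each boundary count is computed once (objective: alternative).

-- ===== PORT A =====
-- analysis[key] : dict lookup (first match in the association list); Pre_ guarantees the key is present,
-- so the "" default is never reached on admitted inputs.
def pvLookup (analysis : List (String × String)) (key : String) : String :=
  ((analysis.find? (fun p => p.1 == key)).map (·.2)).getD ""

-- helper count_boundaries: sum([seg.count(boundary) for boundary in boundaries])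
def count_boundaries (seg : String) (boundaries : List String) : Int :=
  (boundaries.map (fun boundary => (PySem.Str.count seg boundary : Int))).sum

def get_minimal_analyses (analyses : List (List (String × String))) (key : String) (boundaries : List String) : List (List (String × String)) :=
  let minimum : Int :=
    PySem.List.minD (analyses.map (fun analysis => count_boundaries (pvLookup analysis key) boundaries)) (fun x => x) (-1)
  analyses.foldl
    (fun minimal_analyses analysis =>
      if count_boundaries (pvLookup analysis key) boundaries = minimum
      then minimal_analyses ++ [analysis] else minimal_analyses) []

-- ===== PORT B =====
-- the single-pass loop of Source B: state = (best : Option Int, result); a strictly smaller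
-- count resets result to [analysis], an equal count appends.
def pvAltLoop (key : String) (boundaries : List String) :
    List (List (String × String)) → Option Int → List (List (String × String)) → List (List (String × String))
  | [], _, result => result
  | analysis :: rest, best, result =>
    let c := count_boundaries (pvLookup analysis key) boundaries
    match best with
    | none => pvAltLoop key boundaries rest (some c) [analysis]
    | some m =>
      if c < m then pvAltLoop key boundaries rest (some c) [analysis]
      else if c = m then pvAltLoop key boundaries rest (some m) (result ++ [analysis])
      else pvAltLoop key boundaries rest (some m) result

def get_minimal_analyses_alt (analyses : List (List (String × String))) (key : String) (boundaries : List String) : List (List (String × String)) :=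
  pvAltLoop key boundaries analyses none []

-- ===== PRECONDITION & SPEC =====
-- Pre_ excludes exactly the inputs where Python's analysis[key] raises KeyError (key missing
-- from some analysis); B raises there too.
def Pre_get_minimal_analyses (analyses : List (List (String × String))) (key : String) (boundaries : List String) : Prop :=
  ∀ analysis ∈ analyses, key ∈ analysis.map Prod.fst
instance (analyses : List (List (String × String))) (key : String) (boundaries : List String) : Decidable (Pre_get_minimal_analyses analyses key boundaries) := by unfold Pre_get_minimal_analyses; infer_instance

def pvWitness_get_minimal_analyses : (List (List (String × String))) × String × List String :=
  ([[("seg", "a<b<c")], [("seg", "a<b")]], "seg", ["<"])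

def Spec_get_minimal_analyses (analyses : List (List (String × String))) (key : String) (boundaries : List String) (out : List (List (String × String))) : Prop := out = get_minimal_analyses_alt analyses key boundaries
instance (analyses : List (List (String × String))) (key : String) (boundaries : List String) (out : List (List (String × String))) : Decidable (Spec_get_minimal_analyses analyses key boundaries out) := by unfold Spec_get_minimal_analyses; infer_instance

-- ===== CLAIM (what is proved, stated in full; the proofs are below) =====
def Claim_equal_get_minimal_analyses : Prop := ∀ (analyses : List (List (String × String))) (key : String) (boundaries : List String), Dom_get_minimal_analyses analyses key boundaries → Pre_get_minimal_analyses analyses key boundaries → Spec_get_minimal_analyses analyses key boundaries (get_minimal_analyses analyses key boundaries)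

-- ===== LEMMAS AND PROOFS =====

-- Invariant of B's loop once a minimum m is in hand: the final result is the analyses whose
-- count equals the overall minimum M = foldl min m (counts of the rest); the accumulated
-- `result` survives exactly when no strictly smaller count appears later.
lemma pvAltLoop_some (key : String) (boundaries : List String) :
    ∀ (l : List (List (String × String))) (m : Int) (result : List (List (String × String))),
      pvAltLoop key boundaries l (some m) result =
        (if (l.map (fun a => count_boundaries (pvLookup a key) boundaries)).foldl min m = m then result else [])
          ++ l.filter (fun a => count_boundaries (pvLookup a key) boundaries = (l.map (fun a => count_boundaries (pvLookup a key) boundaries)).foldl min m) := by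
  intro l
  induction l with
  | nil => intro m result; simp [pvAltLoop]
  | cons a rest ih =>
    intro m result
    simp only [pvAltLoop, List.map_cons, List.foldl_cons, List.filter_cons, decide_eq_true_eq]
    have hle := (PySem.List.foldl_min_le (rest.map (fun a => count_boundaries (pvLookup a key) boundaries)) (count_boundaries (pvLookup a key) boundaries)).1
    have hlem := (PySem.List.foldl_min_le (rest.map (fun a => count_boundaries (pvLookup a key) boundaries)) m).1
    rcases lt_trichotomy (count_boundaries (pvLookup a key) boundaries) m with h1 | h1 | h1
    · have e : List.foldl min (min m (count_boundaries (pvLookup a key) boundaries)) (rest.map (fun a => count_boundaries (pvLookup a key) boundaries)) = List.foldl min (count_boundaries (pvLookup a key) boundaries) (rest.map (fun a => count_boundaries (pvLookup a key) boundaries)) := by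
        rw [min_eq_right h1.le]
      simp only [e, if_pos h1, ih]
      split_ifs with h2 h3 h4 <;> (try (exfalso; omega)) <;> simp
    · have e : List.foldl min (min m (count_boundaries (pvLookup a key) boundaries)) (rest.map (fun a => count_boundaries (pvLookup a key) boundaries)) = List.foldl min m (rest.map (fun a => count_boundaries (pvLookup a key) boundaries)) := by
        rw [h1, min_self]
      rw [if_neg (by omega), if_pos h1]
      simp only [e, ih]
      split_ifs with h2 h3 h4 <;> (try (exfalso; omega)) <;> simp
    · have e : List.foldl min (min m (count_boundaries (pvLookup a key) boundaries)) (rest.map (fun a => count_boundaries (pvLookup a key) boundaries)) = List.foldl min m (rest.map (fun a => count_boundaries (pvLookup a key) boundaries)) := by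
        rw [min_eq_left h1.le]
      rw [if_neg (by omega), if_neg (by omega)]
      simp only [e, ih]
      split_ifs with h2 h3 h4 <;> (try (exfalso; omega)) <;> simp

-- A's append-loop is a filter against the precomputed minimum.
lemma pvA_eq_filter (analyses : List (List (String × String))) (key : String) (boundaries : List String) (minimum : Int) :
    analyses.foldl
      (fun acc analysis =>
        if count_boundaries (pvLookup analysis key) boundaries = minimum
        then acc ++ [analysis] else acc) [] =
    analyses.filter (fun analysis => count_boundaries (pvLookup analysis key) boundaries = minimum) := by
  have h := PySem.List.foldl_append_if
      (fun analysis => decide (count_boundaries (pvLookup analysis key) boundaries = minimum))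
      (fun a => a) analyses []
  simpa using h

-- ===== VERDICT (by name: the statement is the Claim_ definition above) =====
theorem get_minimal_analyses_spec : Claim_equal_get_minimal_analyses := by
  intro analyses key boundaries _ _
  unfold Spec_get_minimal_analyses get_minimal_analyses get_minimal_analyses_alt
  cases analyses with
  | nil => simp [pvAltLoop]
  | cons a rest =>
    rw [pvA_eq_filter]
    simp only [List.map_cons]
    have hmind : PySem.List.minD
        (count_boundaries (pvLookup a key) boundaries ::
          rest.map (fun analysis => count_boundaries (pvLookup analysis key) boundaries)) (fun x => x) (-1)
      = (rest.map (fun analysis => count_boundaries (pvLookup analysis key) boundaries)).foldl min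
          (count_boundaries (pvLookup a key) boundaries) := by
      simp [PySem.List.minD, PySem.List.min?_id_cons]
    simp only [hmind]
    simp only [pvAltLoop]
    rw [pvAltLoop_some]
    have hle := (PySem.List.foldl_min_le
        (rest.map (fun analysis => count_boundaries (pvLookup analysis key) boundaries))
        (count_boundaries (pvLookup a key) boundaries)).1
    by_cases h : (rest.map (fun analysis => count_boundaries (pvLookup analysis key) boundaries)).foldl min
        (count_boundaries (pvLookup a key) boundaries) = count_boundaries (pvLookup a key) boundaries
    · rw [if_pos h, List.filter_cons, if_pos (by simp [h])]
      simp
    · rw [if_neg h, List.filter_cons, if_neg (by simp; omega)]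
      simp
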